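-- pv_equiv track=rewrite | github.com/DouglasKosvoski/DFA-Generator | main.py | clean_rules
-- ===== SOURCE A (Python) =====
-- def clean_rules(rules_list):
-- 	list_of_clean_rules = []
-- 	list_of_separators = ["::=", "<", ">", "|"]
-- 	for rule in rules_list:
-- 		for separator in list_of_separators:
-- 			rule = rule.replace(separator, "")
-- 		# remove all empty object from the rule
-- 		list_of_clean_rules.append(list(filter(lambda a:a != "", rule.split(" "))))
-- 	return list_of_clean_rules
-- ===== SOURCE B (Python) =====
-- def clean_rules(rules_list):
--     # single left-to-right character scan per rule: spaces end the current
--     # token, "<", ">", "|" and (non-overlapping) "::=" occurrences are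
--     # skipped, everything else is accumulated; no replace/split passes.
--     result = []
--     for rule in rules_list:
--         tokens = []
--         cur = []
--         i = 0
--         n = len(rule)
--         while i < n:
--             ch = rule[i]
--             if ch == " ":
--                 if cur:
--                     tokens.append("".join(cur))
--                 cur = []
--                 i += 1
--             elif rule.startswith("::=", i):
--                 i += 3
--             elif ch == "<" or ch == ">" or ch == "|":
--                 i += 1
--             else:
--                 cur.append(ch)
--                 i += 1
--         if cur:
--             tokens.append("".join(cur))
--         result.append(tokens)
--     return result
-- ===== Notes on version B (the rewrite author's own statement) =====
-- stated objective: alternative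
-- what changed: B replaces A's staged passes (four whole-string replace calls, then split(" "), then filter) with one left-to-right character scan per rule that simultaneously skips separators ('<','>','|' and non-overlapping '::=' matches), ends a token at each space, and emits only non-empty tokens.
import Mathlib
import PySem

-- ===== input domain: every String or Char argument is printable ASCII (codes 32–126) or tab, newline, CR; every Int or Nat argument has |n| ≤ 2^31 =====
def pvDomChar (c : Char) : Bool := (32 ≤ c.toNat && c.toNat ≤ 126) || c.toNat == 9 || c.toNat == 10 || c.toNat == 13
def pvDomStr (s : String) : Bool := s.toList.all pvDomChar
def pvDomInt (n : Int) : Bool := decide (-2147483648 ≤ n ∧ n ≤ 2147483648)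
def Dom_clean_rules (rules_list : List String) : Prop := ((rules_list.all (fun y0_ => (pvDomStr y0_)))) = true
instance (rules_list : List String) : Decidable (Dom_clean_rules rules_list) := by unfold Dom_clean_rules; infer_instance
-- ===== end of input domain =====

-- B replaces A's staged replace/split/filter passes by one left-to-right character
-- scan per rule that skips separators, ends tokens at spaces and emits non-empty tokens; same cost, different algorithm.


-- ===== PORT A =====
def clean_rules (rules_list : List String) : List (List String) :=
  rules_list.foldl (fun list_of_clean_rules rule =>
    let rule := ["::=", "<", ">", "|"].foldl
      (fun rule separator => PySem.Str.replace rule separator "") rule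
    list_of_clean_rules ++
      [((PySem.Str.split? rule " ").getD []).filter (fun a => a != "")]) []

-- ===== PORT B =====
-- the while-loop of Source B: recursion over the remaining characters, `cur` holds the
-- current token's characters in reverse (list-cons accumulation)
def scanB : List Char → List Char → List String
  | [], cur => if cur = [] then [] else [String.ofList cur.reverse]
  | c :: t, cur =>
    if c = ' ' then
      (if cur = [] then id else List.cons (String.ofList cur.reverse)) (scanB t [])
    else if c = ':' ∧ t.take 2 = [':', '='] then  -- rule.startswith("::=", i)
      scanB (t.drop 2) cur
    else if c = '<' ∨ c = '>' ∨ c = '|' then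
      scanB t cur
    else
      scanB t (c :: cur)
termination_by cs _ => cs.length
decreasing_by all_goals (simp; try omega)

def clean_rules_alt (rules_list : List String) : List (List String) :=
  rules_list.map (fun rule => scanB rule.toList [])

-- ===== PRECONDITION & SPEC =====
def Spec_clean_rules (rules_list : List String) (out : List (List String)) : Prop := out = clean_rules_alt rules_list
instance (rules_list : List String) (out : List (List String)) : Decidable (Spec_clean_rules rules_list out) := by unfold Spec_clean_rules; infer_instance

-- ===== CLAIM (what is proved, stated in full; the proofs are below) =====
def Claim_equal_clean_rules : Prop := ∀ (rules_list : List String), Dom_clean_rules rules_list → Spec_clean_rules rules_list (clean_rules rules_list)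

-- ===== LEMMAS AND PROOFS =====

-- structural version of Python's s.replace(o::os, "")
def repS (o : Char) (os : List Char) : List Char → List Char
  | [] => []
  | c :: t =>
    if (o :: os).isPrefixOf (c :: t) then repS o os (t.drop os.length)
    else c :: repS o os t
termination_by cs => cs.length
decreasing_by all_goals (simp; try omega)

theorem repGo (o : Char) (os : List Char) :
    ∀ (fuel : Nat) (l acc : List Char), l.length ≤ fuel →
      PySem.Chars.replace.go (o :: os) [] fuel l acc = acc.reverse ++ repS o os l := by
  intro fuel
  induction fuel with
  | zero =>
    intro l acc h
    have : l = [] := by cases l <;> simp_all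
    subst this
    rw [PySem.Chars.replace.go.eq_def]
    simp [repS]
  | succ n ih =>
    intro l acc h
    cases l with
    | nil => rw [PySem.Chars.replace.go.eq_def]; simp [repS]
    | cons c t =>
      rw [PySem.Chars.replace.go.eq_def]
      simp only []
      by_cases hp : (o :: os).isPrefixOf (c :: t) = true
      · rw [if_pos hp]
        have hlen : (t.drop os.length).length ≤ n := by
          simp at h ⊢; omega
        simp only [List.length_cons, List.drop_succ_cons, List.reverse_nil, List.nil_append]
        rw [ih _ _ hlen]
        rw [repS, if_pos hp]
      · rw [if_neg hp]
        have hlen : t.length ≤ n := by simp at h; omega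
        rw [ih _ _ hlen]
        rw [repS, if_neg hp]
        simp

theorem replace_eq_repS (o : Char) (os cs : List Char) :
    PySem.Chars.replace cs (o :: os) [] = repS o os cs := by
  rw [PySem.Chars.replace]
  simp only [List.isEmpty_cons, if_false, Bool.false_eq_true]
  rw [repGo o os cs.length cs [] le_rfl]
  simp

-- cons onto the head of a token list
def consHd (x : List Char) : List (List Char) → List (List Char)
  | [] => [x]
  | h :: r => (x ++ h) :: r

-- structural version of Python's s.split(" ")
def splS : List Char → List (List Char)
  | [] => [[]]
  | c :: t => if c = ' ' then [] :: splS t else consHd [c] (splS t)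

theorem consHd_ne_nil (x : List Char) (l : List (List Char)) : consHd x l ≠ [] := by
  cases l <;> simp [consHd]

theorem splS_ne_nil (t : List Char) : splS t ≠ [] := by
  cases t with
  | nil => simp [splS]
  | cons c t =>
    rw [splS]
    split_ifs
    · simp
    · exact consHd_ne_nil _ _

theorem consHd_nil (l : List (List Char)) (h : l ≠ []) : consHd [] l = l := by
  cases l with
  | nil => exact absurd rfl h
  | cons a r => simp [consHd]

theorem consHd_assoc (x y : List Char) (l : List (List Char)) :
    consHd x (consHd y l) = consHd (x ++ y) l := by
  cases l <;> simp [consHd]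

theorem splGo :
    ∀ (fuel : Nat) (l cur : List Char) (acc : List (List Char)), l.length < fuel →
      PySem.Chars.splitOn.go [' '] fuel l cur acc = acc.reverse ++ consHd cur.reverse (splS l) := by
  intro fuel
  induction fuel with
  | zero => intro l cur acc h; omega
  | succ n ih =>
    intro l cur acc h
    cases l with
    | nil =>
      rw [PySem.Chars.splitOn.go.eq_def]
      simp [splS, consHd]
    | cons c t =>
      rw [PySem.Chars.splitOn.go.eq_def]
      simp only []
      by_cases hc : c = ' '
      · subst hc
        have hpre : ([' '].isPrefixOf (' ' :: t)) = true := by simp [List.isPrefixOf]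
        rw [if_pos hpre]
        simp only [List.drop_succ_cons, List.drop_zero,
          show ([' '] : List Char).length = 1 from rfl]
        have hlen : t.length < n := by simp at h; omega
        rw [ih _ _ _ hlen]
        rw [splS, if_pos rfl]
        simp only [List.reverse_nil]
        rw [consHd_nil _ (splS_ne_nil t)]
        simp [consHd]
      · have hpre : ([' '].isPrefixOf (c :: t)) = false := by
          simp [List.isPrefixOf]; exact fun h' => hc h'.symm
        rw [hpre]
        simp only [Bool.false_eq_true, if_false]
        have hlen : t.length < n := by simp at h; omega
        rw [ih _ _ _ hlen]
        rw [splS, if_neg hc, consHd_assoc]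
        simp

theorem splitOn_eq_splS (cs : List Char) :
    PySem.Chars.splitOn cs [' '] = splS cs := by
  rw [PySem.Chars.splitOn]
  rw [splGo _ _ _ _ (by omega)]
  simp [consHd_nil _ (splS_ne_nil cs)]

-- the four separators chained, char side (what A's foldl of replaces computes)
def cleanC (cs : List Char) : List Char :=
  repS '|' [] (repS '>' [] (repS '<' [] (repS ':' [':', '='] cs)))

theorem toList_cleanA (s : String) :
    (["::=", "<", ">", "|"].foldl (fun r sep => PySem.Str.replace r sep "") s).toList
      = cleanC s.toList := by
  have hc : ("::=" : String).toList = [':', ':', '='] := by simp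
  have h2 : ("<" : String).toList = ['<'] := by simp
  have h3 : (">" : String).toList = ['>'] := by simp
  have h4 : ("|" : String).toList = ['|'] := by simp
  have he : ("" : String).toList = [] := by simp
  simp only [List.foldl, PySem.Str.toList_replace, hc, h2, h3, h4, he, cleanC]
  rw [replace_eq_repS, replace_eq_repS, replace_eq_repS, replace_eq_repS]

theorem split_getD (s : String) :
    (PySem.Str.split? s " ").getD [] = (splS s.toList).map String.ofList := by
  rw [PySem.Str.split?]
  have : (" " : String).toList = [' '] := by simp
  rw [this, PySem.Chars.split?]
  simp [splitOn_eq_splS]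

theorem foldl_append_map {α β : Type} (f : α → β) :
    ∀ (rs : List α) (acc : List β),
      rs.foldl (fun a r => a ++ [f r]) acc = acc ++ rs.map f := by
  intro rs
  induction rs with
  | nil => intro acc; simp
  | cons r rs ih => intro acc; simp [List.foldl, ih]

-- cleanC step lemmas
theorem repS_cons (o : Char) (os : List Char) (c : Char) (t : List Char) :
    repS o os (c :: t)
      = if (o :: os).isPrefixOf (c :: t) then repS o os (t.drop os.length)
        else c :: repS o os t := by
  rw [repS]

theorem repS_nil (o : Char) (os : List Char) : repS o os [] = [] := by rw [repS]

theorem cleanC_nil : cleanC [] = [] := by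
  simp [cleanC, repS_nil]

theorem cleanC_keep (c : Char) (t : List Char)
    (hp : ([':', ':', '='].isPrefixOf (c :: t)) = false)
    (h1 : c ≠ '<') (h2 : c ≠ '>') (h3 : c ≠ '|') :
    cleanC (c :: t) = c :: cleanC t := by
  have e1 : repS ':' [':', '='] (c :: t) = c :: repS ':' [':', '='] t := by
    rw [repS_cons, if_neg (by simp [hp])]
  have e2 : ∀ X, repS '<' [] (c :: X) = c :: repS '<' [] X := by
    intro X
    rw [repS_cons, if_neg (by simp [List.isPrefixOf]; exact fun h => h1 h.symm)]
  have e3 : ∀ X, repS '>' [] (c :: X) = c :: repS '>' [] X := by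
    intro X
    rw [repS_cons, if_neg (by simp [List.isPrefixOf]; exact fun h => h2 h.symm)]
  have e4 : ∀ X, repS '|' [] (c :: X) = c :: repS '|' [] X := by
    intro X
    rw [repS_cons, if_neg (by simp [List.isPrefixOf]; exact fun h => h3 h.symm)]
  unfold cleanC
  rw [e1, e2, e3, e4]

theorem cleanC_colons (u : List Char) :
    cleanC (':' :: ':' :: '=' :: u) = cleanC u := by
  unfold cleanC
  rw [repS_cons, if_pos (by simp [List.isPrefixOf])]
  simp

theorem repS_self (o : Char) (X : List Char) :
    repS o [] (o :: X) = repS o [] X := by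
  rw [repS_cons, if_pos (by simp [List.isPrefixOf])]
  simp

theorem repS_skip (o c : Char) (X : List Char) (h : o ≠ c) :
    repS o [] (c :: X) = c :: repS o [] X := by
  rw [repS_cons, if_neg (by simp [List.isPrefixOf]; exact h)]

theorem cleanC_single (c : Char) (t : List Char)
    (hc : c = '<' ∨ c = '>' ∨ c = '|') :
    cleanC (c :: t) = cleanC t := by
  have e1 : repS ':' [':', '='] (c :: t) = c :: repS ':' [':', '='] t := by
    rw [repS_cons, if_neg (by rcases hc with h | h | h <;> subst h <;> simp [List.isPrefixOf])]
  unfold cleanC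
  rw [e1]
  rcases hc with h | h | h <;> subst h
  · rw [repS_self]
  · rw [repS_skip '<' '>' _ (by decide), repS_self]
  · rw [repS_skip '<' '|' _ (by decide), repS_skip '>' '|' _ (by decide), repS_self]

theorem take2_of_isPrefixOf (t : List Char)
    (h : ([':', '='].isPrefixOf t) = true) : t.take 2 = [':', '='] := by
  obtain ⟨u, hu⟩ := List.isPrefixOf_iff_prefix.mp h
  rw [← hu]
  simp

-- the main loop invariant: the scan of the remaining chars with accumulator `cur`
-- equals A's clean-then-split-then-filter on those chars, with cur.reverse glued
-- onto the first produced token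
theorem scanB_eq :
    ∀ (fuel : Nat) (cs cur : List Char), cs.length ≤ fuel →
      scanB cs cur
        = ((consHd cur.reverse (splS (cleanC cs))).filter (fun l => l ≠ [])).map String.ofList := by
  intro fuel
  induction fuel with
  | zero =>
    intro cs cur h
    have : cs = [] := by cases cs <;> simp_all
    subst this
    rw [scanB]
    rw [cleanC_nil, splS]
    by_cases hc : cur = []
    · subst hc; simp [consHd]
    · have : cur.reverse ≠ [] := by simpa using hc
      simp [consHd, hc, this, List.filter]
  | succ n ih =>
    intro cs cur h
    cases cs with
    | nil =>
      rw [scanB]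
      rw [cleanC_nil, splS]
      by_cases hc : cur = []
      · subst hc; simp [consHd]
      · have : cur.reverse ≠ [] := by simpa using hc
        simp [consHd, hc, this, List.filter]
    | cons c t =>
      have hlt : t.length ≤ n := by simp at h; omega
      rw [scanB]
      by_cases hsp : c = ' '
      · rw [if_pos hsp]
        subst hsp
        have hck : cleanC (' ' :: t) = ' ' :: cleanC t :=
          cleanC_keep _ _ (by simp [List.isPrefixOf]) (by decide) (by decide) (by decide)
        rw [hck, splS, if_pos rfl]
        have hcons : consHd cur.reverse ([] :: splS (cleanC t))
            = cur.reverse :: splS (cleanC t) := by simp [consHd]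
        rw [hcons]
        have hrest : scanB t [] = ((splS (cleanC t)).filter (fun l => l ≠ [])).map String.ofList := by
          rw [ih t [] hlt]
          rw [show ([] : List Char).reverse = [] from rfl,
              consHd_nil _ (splS_ne_nil _)]
        by_cases hc : cur = []
        · subst hc
          simp only [id]
          rw [hrest]
          simp [List.filter]
        · have hne : (cur.reverse ≠ ([] : List Char)) := by simpa using hc
          rw [if_neg hc, hrest]
          simp [List.filter, hne]
      · rw [if_neg hsp]
        by_cases hcol : c = ':' ∧ t.take 2 = [':', '=']
        · rw [if_pos hcol]
          obtain ⟨hc1, hc2⟩ := hcol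
          subst hc1
          -- t = ':' :: '=' :: u
          cases t with
          | nil => simp at hc2
          | cons a t' =>
            cases t' with
            | nil => simp at hc2
            | cons b u =>
              have ha : a = ':' ∧ b = '=' := by
                constructor <;> (simp [List.take] at hc2; tauto)
              obtain ⟨ha1, ha2⟩ := ha; subst ha1; subst ha2
              have hdrop : (':' :: '=' :: u).drop 2 = u := by simp
              rw [hdrop]
              rw [cleanC_colons]
              exact ih u cur (by simp at h; omega)
        · rw [if_neg hcol]
          by_cases hsg : c = '<' ∨ c = '>' ∨ c = '|'
          · rw [if_pos hsg]
            rw [cleanC_single c t hsg]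
            exact ih t cur hlt
          · rw [if_neg hsg]
            rw [not_or, not_or] at hsg
            obtain ⟨h1, h2, h3⟩ := hsg
            have hp : ([':', ':', '='].isPrefixOf (c :: t)) = false := by
              by_cases hcc : c = ':'
              · subst hcc
                have hpt : ([':', '='].isPrefixOf t) = false := by
                  cases hq : [':', '='].isPrefixOf t
                  · rfl
                  · exact absurd ⟨rfl, take2_of_isPrefixOf t hq⟩ hcol
                simp [List.isPrefixOf, hpt]
              · have hne : (':' == c) = false := by
                  simp; exact fun h' => hcc h'.symm
                simp [List.isPrefixOf, hne]
            rw [cleanC_keep c t hp h1 h2 h3]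
            rw [splS, if_neg hsp, consHd_assoc]
            have : cur.reverse ++ [c] = (c :: cur).reverse := by simp
            rw [this]
            exact ih t (c :: cur) hlt

theorem filter_map_ofList (X : List (List Char)) :
    ((X.map String.ofList).filter (fun a => a != ""))
      = ((X.filter (fun l => l ≠ [])).map String.ofList) := by
  induction X with
  | nil => rfl
  | cons l X ih =>
    by_cases hl : l = []
    · subst hl; simpa [List.filter] using ih
    · have h1 : (String.ofList l != "") = true := by
        simp only [bne_iff_ne, ne_eq]
        intro hcon
        exact hl (by simpa using congrArg String.toList hcon)
      have h2 : (decide (l = []) : Bool) = false := by simp [hl]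
      simp [List.filter, h1, h2, ih]

theorem per_rule (rule : String) :
    ((PySem.Str.split? (["::=", "<", ">", "|"].foldl
        (fun rule separator => PySem.Str.replace rule separator "") rule) " ").getD []).filter
        (fun a => a != "")
      = scanB rule.toList [] := by
  rw [split_getD]
  rw [toList_cleanA]
  rw [filter_map_ofList]
  rw [scanB_eq rule.toList.length rule.toList [] le_rfl]
  rw [show ([] : List Char).reverse = [] from rfl, consHd_nil _ (splS_ne_nil _)]

-- ===== VERDICT (by name: the statement is the Claim_ definition above) =====
theorem clean_rules_spec : Claim_equal_clean_rules := by
  intro rules_list _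
  unfold Spec_clean_rules clean_rules clean_rules_alt
  rw [foldl_append_map]
  rw [List.nil_append]
  apply List.map_congr_left
  intro rule _
  exact per_rule rule
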